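-- pv_equiv track=rewrite | github.com/nathan0404/reddit-story-project | video_processing.py | combine_text_words
-- ===== SOURCE A (Python) =====
-- def combine_text_words(words):
--     target_words = ["my", "he", "she", "you", "me", "I", "we", "us", "this", "them", "that",
--                     "am", "is", "are", "was", "were", "be", "being", "been"]
--     i = 0
--     while i < len(words):
--         word = words[i]
--         if word in target_words and i + 1 < len(words):
--             # Combine 'my' with the following word
--             words[i] = f"{word} {words[i + 1]}"
--             del words[i + 1]  # Remove the next word since it's combined
--         elif word in ["u", "r"] and i + 2 < len(words) and words[i + 1] == "/":
--             # Combine 'my' with the following word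
--             words[i] = f"{word}{words[i + 1]}{words[i+2]}"
--             del words[i + 2]  # Remove the next word since it's combined
--             del words[i + 1]  # Remove the next word since it's combined
--         else:
--             i += 1
--     return words
-- ===== SOURCE B (Python) =====
-- def combine_text_words(words):
--     targets = {"my", "he", "she", "you", "me", "I", "we", "us", "this", "them", "that",
--                "am", "is", "are", "was", "were", "be", "being", "been"}
--     out = []
--     buf = []
--     for w in words:
--         buf.append(w)
--         if len(buf) == 3:
--             a, b, c = buf
--             if a in targets:
--                 out.append(a + " " + b)
--                 buf = [c]
--             elif a in ("u", "r") and b == "/":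
--                 out.append(a + b + c)
--                 buf = []
--             else:
--                 out.append(a)
--                 buf = [b, c]
--     if len(buf) == 2 and buf[0] in targets:
--         out.append(buf[0] + " " + buf[1])
--     else:
--         out.extend(buf)
--     words[:] = out
--     return words
-- ===== Notes on version B (the rewrite author's own statement) =====
-- stated objective: faster
-- what changed: A repeatedly mutates the list in place (set + del, shifting the tail each time) and re-examines the merged word at the same index; B is an index-free streaming fold over the words carrying a bounded 3-token lookahead buffer, emitting merged or plain tokens and flushing the buffer at the end.
import Mathlib
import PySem

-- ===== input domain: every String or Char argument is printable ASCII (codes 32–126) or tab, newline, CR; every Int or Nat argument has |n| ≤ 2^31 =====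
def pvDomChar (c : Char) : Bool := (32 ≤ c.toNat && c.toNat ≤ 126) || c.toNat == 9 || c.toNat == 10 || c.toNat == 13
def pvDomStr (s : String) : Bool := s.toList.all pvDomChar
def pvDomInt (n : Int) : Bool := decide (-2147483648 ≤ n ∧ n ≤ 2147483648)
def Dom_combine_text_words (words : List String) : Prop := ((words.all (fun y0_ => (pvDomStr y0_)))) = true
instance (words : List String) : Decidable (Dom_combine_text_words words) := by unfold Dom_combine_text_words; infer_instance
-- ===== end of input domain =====

-- B replaces A's quadratic in-place merge-and-delete loop (which re-scans the merged word and
-- shifts the tail on every `del`) by an index-free streaming fold with a bounded 3-token lookahead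
-- buffer (objective: faster, asymptotic). A mutates its argument in place; B performs the same
-- final mutation (words[:] = out), so the observable list state agrees too.

-- ===== PORT A =====
def aTargets : List String :=
  ["my", "he", "she", "you", "me", "I", "we", "us", "this", "them", "that",
   "am", "is", "are", "was", "were", "be", "being", "been"]

-- transliteration of A's while loop: in-place set + eraseIdx, index i re-checked after a merge
def aLoop (words : List String) (i : Nat) : List String :=
  if h : i < words.length then
    let word := words.getD i ""
    if h2 : word ∈ aTargets ∧ i + 1 < words.length then
      aLoop ((words.set i (word ++ " " ++ words.getD (i + 1) "")).eraseIdx (i + 1)) i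
    else if h3 : (word = "u" ∨ word = "r") ∧ i + 2 < words.length ∧ words.getD (i + 1) "" = "/" then
      aLoop (((words.set i (word ++ words.getD (i + 1) "" ++ words.getD (i + 2) "")).eraseIdx (i + 2)).eraseIdx (i + 1)) i
    else
      aLoop words (i + 1)
  else words
termination_by words.length - i
decreasing_by
  · obtain ⟨-, h22⟩ := h2
    simp only [List.length_eraseIdx, List.length_set]
    split_ifs
    all_goals omega
  · obtain ⟨-, h32, -⟩ := h3
    simp only [List.length_eraseIdx, List.length_set]
    split_ifs
    all_goals omega
  · omega

def combine_text_words (words : List String) : List String := aLoop words 0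

-- ===== PORT B =====
def bTargets : PySem.Set String :=
  PySem.Set.ofList ["my", "he", "she", "you", "me", "I", "we", "us", "this", "them", "that",
                    "am", "is", "are", "was", "were", "be", "being", "been"]

-- B's loop body: push w into the lookahead buffer; once it holds 3 tokens, decide on its head
def bStep (st : List String × List String) (w : String) : List String × List String :=
  match st with
  | (out, buf) =>
    match buf ++ [w] with
    | [a, b, c] =>
      if PySem.Set.contains bTargets a then (out ++ [a ++ " " ++ b], [c])
      else if (a = "u" ∨ a = "r") ∧ b = "/" then (out ++ [a ++ b ++ c], [])
      else (out ++ [a], [b, c])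
    | buf' => (out, buf')

-- B's final flush of the (≤ 2 token) buffer
def bFlush (st : List String × List String) : List String :=
  match st with
  | (out, [a, b]) =>
    if PySem.Set.contains bTargets a then out ++ [a ++ " " ++ b] else out ++ [a, b]
  | (out, buf) => out ++ buf

def combine_text_words_alt (words : List String) : List String :=
  bFlush (words.foldl bStep ([], []))

-- ===== PRECONDITION & SPEC =====
def Spec_combine_text_words (words : List String) (out : List String) : Prop := out = combine_text_words_alt words
instance (words : List String) (out : List String) : Decidable (Spec_combine_text_words words out) := by unfold Spec_combine_text_words; infer_instance

-- ===== CLAIM (what is proved, stated in full; the proofs are below) =====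
def Claim_equal_combine_text_words : Prop := ∀ (words : List String), Dom_combine_text_words words → Spec_combine_text_words words (combine_text_words words)

-- ===== LEMMAS AND PROOFS =====

-- common functional characterisation both programs compute: structural one-pass merge
def pvF : List String → List String
  | [] => []
  | [w] => [w]
  | w :: x :: rest =>
    if w ∈ aTargets then (w ++ " " ++ x) :: pvF rest
    else
      match rest with
      | [] => [w, x]
      | y :: rest' =>
        if (w = "u" ∨ w = "r") ∧ x = "/" then (w ++ x ++ y) :: pvF rest'
        else w :: pvF (x :: y :: rest')

lemma pvF_nil : pvF [] = [] := by rw [pvF.eq_def]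

lemma pvF_single (w : String) : pvF [w] = [w] := by rw [pvF.eq_def]

lemma pvF_merge1 (w x : String) (r : List String) (hw : w ∈ aTargets) :
    pvF (w :: x :: r) = (w ++ " " ++ x) :: pvF r := by
  rw [pvF.eq_def]; simp [hw]

lemma pvF_merge2 (w x y : String) (r : List String) (hw : w ∉ aTargets)
    (hc : (w = "u" ∨ w = "r") ∧ x = "/") : pvF (w :: x :: y :: r) = (w ++ x ++ y) :: pvF r := by
  rw [pvF.eq_def]; simp [hw, hc.1, hc.2]

lemma pvF_skip (w x y : String) (r : List String) (hw : w ∉ aTargets)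
    (hc : ¬((w = "u" ∨ w = "r") ∧ x = "/")) : pvF (w :: x :: y :: r) = w :: pvF (x :: y :: r) := by
  rw [pvF.eq_def]; simp only [if_neg hw, if_neg hc]

lemma pvF_pair (w x : String) (hw : w ∉ aTargets) : pvF [w, x] = [w, x] := by
  rw [pvF.eq_def]; simp [hw]

-- no target word (nor "u"/"r") contains a space or a slash
lemma pv_targets_clean : ∀ t ∈ "u" :: "r" :: aTargets, (' ' ∉ t.toList ∧ '/' ∉ t.toList) := by decide

lemma pv_merged_space_not_mem (w x : String) : (w ++ " " ++ x) ∉ "u" :: "r" :: aTargets := by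
  intro hmem
  have h := (pv_targets_clean _ hmem).1
  apply h
  simp [String.toList_append]

lemma pv_merged_slash_not_mem (w y : String) : (w ++ "/" ++ y) ∉ "u" :: "r" :: aTargets := by
  intro hmem
  have h := (pv_targets_clean _ hmem).2
  apply h
  simp [String.toList_append]

-- A's loop never re-triggers on a merged word, so it is pvF on the unprocessed suffix
lemma pv_aLoop_frozen : ∀ (k : Nat) (rest : List String), rest.length ≤ k →
    ∀ (done : List String), aLoop (done ++ rest) done.length = done ++ pvF rest := by
  intro k
  induction k with
  | zero =>
    intro rest hk done
    have : rest = [] := List.eq_nil_of_length_eq_zero (by omega)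
    subst this
    rw [aLoop]
    simp [pvF_nil]
  | succ k ih =>
    intro rest hk done
    match rest with
    | [] =>
      rw [aLoop]; simp [pvF_nil]
    | [w] =>
      rw [aLoop]
      have hlen : done.length < (done ++ [w]).length := by simp
      rw [dif_pos hlen]
      have hget : (done ++ [w]).getD done.length "" = w := by
        rw [List.getD_eq_getElem _ _ hlen]
        simp
      rw [dif_neg (by simp [List.length_append]), dif_neg (by simp [List.length_append])]
      have := ih [] (by simp) (done ++ [w])
      simpa [pvF_nil, pvF_single] using this
    | w :: x :: rest'' =>
      rw [aLoop]
      have hlen : done.length < (done ++ w :: x :: rest'').length := by simp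
      rw [dif_pos hlen]
      have hget : (done ++ w :: x :: rest'').getD done.length "" = w := by
        rw [List.getD_eq_getElem _ _ hlen]
        simp
      have hget1 : (done ++ w :: x :: rest'').getD (done.length + 1) "" = x := by
        rw [List.getD_eq_getElem _ _ (by simp)]
        rw [List.getElem_append_right (by omega)]
        simp
      by_cases hw : w ∈ aTargets
      · -- first merge branch
        rw [dif_pos ⟨by rw [hget]; exact hw, by simp only [List.length_append, List.length_cons]; omega⟩]
        rw [hget, hget1]
        set m := w ++ " " ++ x with hm
        have hset : (done ++ w :: x :: rest'').set done.length m = done ++ m :: x :: rest'' := by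
          rw [List.set_append_right _ _ (le_refl _)]
          simp
        have herase : (done ++ m :: x :: rest'').eraseIdx (done.length + 1) = done ++ m :: rest'' := by
          rw [List.eraseIdx_append_of_length_le (by omega)]
          simp [List.eraseIdx]
        rw [hset, herase]
        -- re-check at same index: merged word triggers nothing
        rw [aLoop]
        have hlen2 : done.length < (done ++ m :: rest'').length := by simp
        rw [dif_pos hlen2]
        have hget2 : (done ++ m :: rest'').getD done.length "" = m := by
          rw [List.getD_eq_getElem _ _ hlen2]; simp
        have hnm := pv_merged_space_not_mem w x
        rw [dif_neg (by rw [hget2]; intro hc; exact hnm (List.mem_cons_of_mem _ (List.mem_cons_of_mem _ hc.1)))]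
        rw [dif_neg (by rw [hget2]; intro hc; refine hnm ?_; rw [show w ++ " " ++ x = m from hm.symm]; rcases hc.1 with h | h <;> simp [h])]
        have : done.length + 1 = (done ++ [m]).length := by simp
        rw [this]
        have hassoc : done ++ m :: rest'' = (done ++ [m]) ++ rest'' := by simp
        rw [hassoc, ih rest'' (by simp at hk; omega) (done ++ [m])]
        rw [pvF_merge1 _ _ _ hw]
        simp [hm]
      · by_cases hur : (w = "u" ∨ w = "r") ∧ done.length + 2 < (done ++ w :: x :: rest'').length ∧ x = "/"
        · -- u/r merge branch
          rw [dif_neg (by rw [hget]; tauto)]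
          rw [dif_pos (by rw [hget, hget1]; exact hur)]
          rw [hget, hget1]
          obtain ⟨hw', hlen3, hx⟩ := hur
          have hr : ∃ y rest3, rest'' = y :: rest3 := by
            match rest'' with
            | [] => simp at hlen3
            | y :: r => exact ⟨y, r, rfl⟩
          obtain ⟨y, rest3, rfl⟩ := hr
          have hget2 : (done ++ w :: x :: y :: rest3).getD (done.length + 2) "" = y := by
            rw [List.getD_eq_getElem _ _ (by simp)]
            rw [List.getElem_append_right (by omega)]
            simp
          rw [hget2]
          set m := w ++ x ++ y with hm
          have hset : (done ++ w :: x :: y :: rest3).set done.length m = done ++ m :: x :: y :: rest3 := by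
            rw [List.set_append_right _ _ (le_refl _)]
            simp
          have herase2 : (done ++ m :: x :: y :: rest3).eraseIdx (done.length + 2) = done ++ m :: x :: rest3 := by
            rw [List.eraseIdx_append_of_length_le (by omega)]
            simp [List.eraseIdx]
          have herase1 : (done ++ m :: x :: rest3).eraseIdx (done.length + 1) = done ++ m :: rest3 := by
            rw [List.eraseIdx_append_of_length_le (by omega)]
            simp [List.eraseIdx]
          rw [hset, herase2, herase1]
          rw [aLoop]
          have hlen2 : done.length < (done ++ m :: rest3).length := by simp
          rw [dif_pos hlen2]
          have hget3 : (done ++ m :: rest3).getD done.length "" = m := by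
            rw [List.getD_eq_getElem _ _ hlen2]; simp
          have hnm : m ∉ "u" :: "r" :: aTargets := by
            rw [hm, hx]; exact pv_merged_slash_not_mem w y
          rw [dif_neg (by rw [hget3]; intro hc; exact hnm (List.mem_cons_of_mem _ (List.mem_cons_of_mem _ hc.1)))]
          rw [dif_neg (by rw [hget3]; intro hc; exact hnm (by rcases hc.1 with h | h <;> simp [h]))]
          have : done.length + 1 = (done ++ [m]).length := by simp
          rw [this]
          have hassoc : done ++ m :: rest3 = (done ++ [m]) ++ rest3 := by simp
          rw [hassoc, ih rest3 (by simp at hk; omega) (done ++ [m])]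
          rw [pvF_merge2 _ _ _ _ hw ⟨hw', hx⟩]
          simp [hm]
        · -- no merge: advance
          rw [dif_neg (by rw [hget]; tauto)]
          rw [dif_neg (by rw [hget, hget1]; exact hur)]
          have : done.length + 1 = (done ++ [w]).length := by simp
          rw [this]
          have hassoc : done ++ w :: x :: rest'' = (done ++ [w]) ++ x :: rest'' := by simp
          rw [hassoc, ih (x :: rest'') (by simp at hk ⊢; omega) (done ++ [w])]
          match rest'' with
          | [] =>
            rw [pvF_pair _ _ hw, pvF_single]
            simp
          | y :: rest3 =>
            have hur' : ¬((w = "u" ∨ w = "r") ∧ x = "/") := by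
              intro ⟨h1, h2⟩
              exact hur ⟨h1, by simp, h2⟩
            rw [pvF_skip _ _ _ _ hw hur']
            simp

lemma pv_bTargets_list : (bTargets : List String) = aTargets := by decide

lemma pv_bTargets_mem (w : String) : PySem.Set.contains bTargets w = true ↔ w ∈ aTargets := by
  rw [pv_bTargets_list.symm]
  simp [PySem.Set.contains]

lemma pv_mem_bTargets (w : String) : w ∈ (bTargets : List String) ↔ w ∈ aTargets := by
  rw [pv_bTargets_list]

-- the flush of the buffer is pvF of the buffer
lemma pv_bFlush_eq (out buf : List String) (hb : buf.length ≤ 2) :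
    bFlush (out, buf) = out ++ pvF buf := by
  match buf with
  | [] => simp [bFlush, pvF_nil]
  | [a] => simp [bFlush, pvF_single]
  | [a, b] =>
    by_cases hw : a ∈ aTargets
    · rw [pvF_merge1 _ _ _ hw, pvF_nil]
      simp [bFlush, pv_mem_bTargets, hw]
    · rw [pvF_pair _ _ hw]
      simp [bFlush, pv_mem_bTargets, hw]
  | _ :: _ :: _ :: _ => simp at hb

-- invariant of B's fold: flushing the result equals out ++ pvF (buffer ++ remaining input)
lemma pv_bFold_eq : ∀ (r out buf : List String), buf.length ≤ 2 →
    bFlush (r.foldl bStep (out, buf)) = out ++ pvF (buf ++ r) := by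
  intro r
  induction r with
  | nil =>
    intro out buf hb
    simpa using pv_bFlush_eq out buf hb
  | cons w r ih =>
    intro out buf hb
    rw [List.foldl_cons]
    match buf with
    | [] =>
      have hstep : bStep (out, []) w = (out, [w]) := by simp [bStep]
      rw [hstep, ih out [w] (by simp)]
      simp
    | [a] =>
      have hstep : bStep (out, [a]) w = (out, [a, w]) := by simp [bStep]
      rw [hstep, ih out [a, w] (by simp)]
      simp
    | [a, b] =>
      by_cases hw : a ∈ aTargets
      · have hstep : bStep (out, [a, b]) w = (out ++ [a ++ " " ++ b], [w]) := by
          simp [bStep, pv_mem_bTargets, hw]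
        rw [hstep, ih _ [w] (by simp)]
        rw [show ([a, b] ++ w :: r) = a :: b :: (w :: r) by simp, pvF_merge1 _ _ _ hw]
        simp
      · have hcf : PySem.Set.contains bTargets a = false := by
          rw [Bool.eq_false_iff]; intro hc; exact hw ((pv_bTargets_mem a).mp hc)
        by_cases hur : (a = "u" ∨ a = "r") ∧ b = "/"
        · have hstep : bStep (out, [a, b]) w = (out ++ [a ++ b ++ w], []) := by
            simp [bStep, pv_mem_bTargets, hw, hur.1, hur.2]
          rw [hstep, ih _ [] (by simp)]
          rw [show ([a, b] ++ w :: r) = a :: b :: w :: r by simp, pvF_merge2 _ _ _ _ hw hur]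
          simp
        · have hstep : bStep (out, [a, b]) w = (out ++ [a], [b, w]) := by
            simp only [bStep, List.cons_append, List.nil_append, hcf, Bool.false_eq_true,
              if_false, if_neg hur]
          rw [hstep, ih _ [b, w] (by simp)]
          rw [show ([a, b] ++ w :: r) = a :: b :: w :: r by simp, pvF_skip _ _ _ _ hw hur]
          simp
    | _ :: _ :: _ :: _ => simp at hb

-- ===== VERDICT (by name: the statement is the Claim_ definition above) =====
theorem combine_text_words_spec : Claim_equal_combine_text_words := by
  intro words _
  unfold Spec_combine_text_words combine_text_words combine_text_words_alt
  have ha : aLoop words 0 = pvF words := by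
    have := pv_aLoop_frozen words.length words (le_refl _) []
    simpa using this
  have hb : bFlush (words.foldl bStep ([], [])) = pvF words := by
    have := pv_bFold_eq words [] [] (by simp)
    simpa using this
  rw [ha, hb]
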